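-- pv_equiv track=rewrite | github.com/ZPGuiGroupWhu/OGC-WMS-Discovery-Portal | server/querywmslist_server_flask/MDL_RM/src/main/intention_recognition/RuleGO_Gruca2017.py | get_unique_terms_num
-- ===== SOURCE A (Python) =====
-- def get_unique_terms_num(rule_a, rule_b, ontologies):
--     result = 0
--     for tmp_term in rule_a:
--         tmp_dim, tmp_value = tmp_term
--         is_unique = True
--         for tmp_term_in_rule_b in rule_b:
--             tmp_dim_rule_b, tmp_value_rule_b = tmp_term_in_rule_b
--             if tmp_dim_rule_b != tmp_dim:
--                 continue
--             if tmp_value == tmp_value_rule_b: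
--                 is_unique = False
--                 break
--             if tmp_value in ontologies[tmp_dim][tmp_value_rule_b] or tmp_value_rule_b in ontologies[tmp_dim][tmp_value]:
--                 is_unique = False
--                 break
--         if is_unique:
--             result += 1
--     return result
-- ===== SOURCE B (Python) =====
-- def get_unique_terms_num(rule_a, rule_b, ontologies):
--     dims = {d for d, _ in rule_a}
--     b_values = {}
--     b_related = {}
--     for d, v in rule_b:
--         if d not in dims:
--             continue
--         b_values.setdefault(d, set()).add(v)
--         b_related.setdefault(d, set()).update(ontologies[d][v])
--     result = 0
--     for d, v in rule_a:
--         if d not in b_values: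
--             result += 1
--         elif v not in b_values[d] and v not in b_related[d] \
--                 and b_values[d].isdisjoint(ontologies[d][v]):
--             result += 1
--     return result
-- ===== Notes on version B (the rewrite author's own statement) =====
-- stated objective: alternative
-- what changed: Instead of scanning rule_b for every rule_a term, B builds per-dimension indexes of rule_b once (the set of its values and the union of their ontology neighbour lists) and decides each rule_a term by set membership plus one disjointness test against its own neighbour list.
-- outside the precondition, e.g. on get_unique_terms_num([('d', 'x')], [('d', 'x')], {}): A returns 0, B raises KeyError
import Mathlib
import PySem

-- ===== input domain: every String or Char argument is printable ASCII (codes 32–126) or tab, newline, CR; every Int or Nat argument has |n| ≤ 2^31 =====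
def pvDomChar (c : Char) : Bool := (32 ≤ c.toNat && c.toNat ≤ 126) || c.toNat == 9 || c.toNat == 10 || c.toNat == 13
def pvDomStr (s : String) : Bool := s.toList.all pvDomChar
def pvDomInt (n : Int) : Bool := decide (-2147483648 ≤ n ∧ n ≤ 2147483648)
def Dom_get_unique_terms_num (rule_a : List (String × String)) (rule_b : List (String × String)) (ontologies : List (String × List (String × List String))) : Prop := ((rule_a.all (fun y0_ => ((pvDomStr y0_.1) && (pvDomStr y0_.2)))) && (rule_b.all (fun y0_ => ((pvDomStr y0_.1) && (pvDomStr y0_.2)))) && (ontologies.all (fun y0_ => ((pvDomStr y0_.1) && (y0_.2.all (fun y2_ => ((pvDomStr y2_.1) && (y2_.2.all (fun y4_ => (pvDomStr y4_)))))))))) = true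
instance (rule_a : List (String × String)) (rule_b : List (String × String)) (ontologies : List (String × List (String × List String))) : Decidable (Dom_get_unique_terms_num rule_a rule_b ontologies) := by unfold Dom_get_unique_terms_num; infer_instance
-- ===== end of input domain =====

-- B replaces A's rule_b rescan per rule_a term by per-dimension indexes of rule_b built once (an alternative, index-based algorithm); neither program mutates its arguments.

-- ===== PORT A =====
-- ontologies[d][v]: two chained dict lookups; Pre_ guarantees both keys exist wherever either program evaluates this, so getD [] is exact there
def pvOnt (ontologies : List (String × List (String × List String))) (d v : String) : List String :=
  (PySem.Dict.mk ((PySem.Dict.mk ontologies).getD d [])).getD v []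

-- A's inner 'for tmp_term_in_rule_b in rule_b' loop with its break: returns is_unique
def pvInnerA (ontologies : List (String × List (String × List String))) (d va : String) : List (String × String) → Bool
  | [] => true
  | tb :: rest =>
    if tb.1 ≠ d then pvInnerA ontologies d va rest
    else if va == tb.2 then false
    else if (pvOnt ontologies d tb.2).contains va || (pvOnt ontologies d va).contains tb.2 then false
    else pvInnerA ontologies d va rest

def get_unique_terms_num (rule_a : List (String × String)) (rule_b : List (String × String)) (ontologies : List (String × List (String × List String))) : Int :=
  rule_a.foldl (fun result t => if pvInnerA ontologies t.1 t.2 rule_b then result + 1 else result) 0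

-- ===== PORT B =====
-- one step of B's indexing loop over rule_b: add t.2 to b_values[t.1], union ontologies[t.1][t.2] into b_related[t.1]
def pvStepB (dims : PySem.Set String) (ontologies : List (String × List (String × List String)))
    (st : PySem.Dict String (PySem.Set String) × PySem.Dict String (PySem.Set String)) (t : String × String) :
    PySem.Dict String (PySem.Set String) × PySem.Dict String (PySem.Set String) :=
  if dims.contains t.1 then
    (st.1.insert t.1 (PySem.Set.add (st.1.getD t.1 PySem.Set.empty) t.2),
     st.2.insert t.1 (PySem.Set.update (st.2.getD t.1 PySem.Set.empty) (pvOnt ontologies t.1 t.2)))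
  else st

def get_unique_terms_num_alt (rule_a : List (String × String)) (rule_b : List (String × String)) (ontologies : List (String × List (String × List String))) : Int :=
  let dims : PySem.Set String := PySem.Set.ofList (rule_a.map Prod.fst)
  let st := rule_b.foldl (pvStepB dims ontologies) (PySem.Dict.empty, PySem.Dict.empty)
  rule_a.foldl (fun result t =>
    if st.1.contains t.1 = false then result + 1
    else if (st.1.getD t.1 PySem.Set.empty).contains t.2 = false ∧
            (st.2.getD t.1 PySem.Set.empty).contains t.2 = false ∧
            PySem.Set.isdisjoint (st.1.getD t.1 PySem.Set.empty) (pvOnt ontologies t.1 t.2) = true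
         then result + 1 else result) 0

-- ===== PRECONDITION & SPEC =====
-- Pre_ excludes inputs on which some same-dimension pair of rule_a/rule_b terms lacks an ontology entry for its
-- dimension or values: there A raises KeyError, except when a break or short-circuit accidentally skips the missing
-- lookup (then A returns but the value hinges on loop order; B raises on some of these).
def Pre_get_unique_terms_num (rule_a : List (String × String)) (rule_b : List (String × String)) (ontologies : List (String × List (String × List String))) : Prop :=
  ∀ ta ∈ rule_a, ∀ tb ∈ rule_b, ta.1 = tb.1 →
    (PySem.Dict.mk ontologies).contains ta.1 = true ∧
    (PySem.Dict.mk ((PySem.Dict.mk ontologies).getD ta.1 [])).contains ta.2 = true ∧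
    (PySem.Dict.mk ((PySem.Dict.mk ontologies).getD ta.1 [])).contains tb.2 = true
instance (rule_a : List (String × String)) (rule_b : List (String × String)) (ontologies : List (String × List (String × List String))) : Decidable (Pre_get_unique_terms_num rule_a rule_b ontologies) := by unfold Pre_get_unique_terms_num; infer_instance

def pvWitness_get_unique_terms_num : (List (String × String)) × (List (String × String)) × (List (String × List (String × List String))) :=
  ([("d", "x")], [("d", "y")], [("d", [("x", ["y"]), ("y", [])])])

def Spec_get_unique_terms_num (rule_a : List (String × String)) (rule_b : List (String × String)) (ontologies : List (String × List (String × List String))) (out : Int) : Prop := out = get_unique_terms_num_alt rule_a rule_b ontologies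
instance (rule_a : List (String × String)) (rule_b : List (String × String)) (ontologies : List (String × List (String × List String))) (out : Int) : Decidable (Spec_get_unique_terms_num rule_a rule_b ontologies out) := by unfold Spec_get_unique_terms_num; infer_instance

-- ===== CLAIM (what is proved, stated in full; the proofs are below) =====
def Claim_equal_get_unique_terms_num : Prop := ∀ (rule_a : List (String × String)) (rule_b : List (String × String)) (ontologies : List (String × List (String × List String))), Dom_get_unique_terms_num rule_a rule_b ontologies → Pre_get_unique_terms_num rule_a rule_b ontologies → Spec_get_unique_terms_num rule_a rule_b ontologies (get_unique_terms_num rule_a rule_b ontologies)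

-- ===== LEMMAS AND PROOFS =====

-- Python's set.isdisjoint as a quantifier
theorem pv_isdisjoint_iff (s t : List String) : PySem.Set.isdisjoint s t = true ↔ ∀ x ∈ s, x ∉ t := by
  simp [PySem.Set.isdisjoint]

-- A's inner loop (break and all) is the negation of an existential over rule_b
theorem pvInnerA_eq_not_any (ontologies : List (String × List (String × List String))) (d va : String) (bs : List (String × String)) :
    pvInnerA ontologies d va bs =
      !(bs.any fun tb => tb.1 == d &&
        (va == tb.2 || (pvOnt ontologies d tb.2).contains va || (pvOnt ontologies d va).contains tb.2)) := by
  induction bs with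
  | nil => simp [pvInnerA]
  | cons tb rest ih =>
    obtain ⟨b1, b2⟩ := tb
    simp only [pvInnerA, List.any_cons]
    by_cases h1 : b1 ≠ d
    · rw [if_pos h1, ih]
      have hb : (b1 == d) = false := by simpa using h1
      simp only [hb, Bool.false_and, Bool.false_or]
    · rw [if_neg h1]
      have hb1 : (b1 == d) = true := by simpa using not_not.mp h1
      by_cases h2 : (va == b2) = true
      · rw [if_pos h2]
        simp only [hb1, h2, Bool.true_and, Bool.true_or, Bool.not_true]
      · have h2' : (va == b2) = false := by
          cases hq : (va == b2) with
          | true => exact absurd hq h2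
          | false => rfl
        rw [if_neg h2]
        cases hc1 : (pvOnt ontologies d b2).contains va with
        | true =>
          rw [if_pos (by simp)]
          simp [hb1, h2']
        | false =>
          cases hc2 : (pvOnt ontologies d va).contains b2 with
          | true =>
            rw [if_pos (by simp)]
            simp [hb1, h2']
          | false =>
            rw [if_neg (by simp), ih]
            simp [hb1, h2']

-- key-presence in b_values after the indexing fold
theorem pvStepB_contains (dims : PySem.Set String) (ontologies : List (String × List (String × List String)))
    (bs : List (String × String)) (V R : PySem.Dict String (PySem.Set String)) (d : String) :
    (bs.foldl (pvStepB dims ontologies) (V, R)).1.contains d = true ↔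
      V.contains d = true ∨ (dims.contains d = true ∧ ∃ u ∈ bs, u.1 = d) := by
  induction bs generalizing V R with
  | nil => simp
  | cons t rest ih =>
    obtain ⟨t1, t2⟩ := t
    simp only [List.foldl_cons, pvStepB]
    by_cases hc : dims.contains t1 = true
    · rw [if_pos hc, ih, PySem.Dict.contains_insert]
      simp only [Bool.or_eq_true, beq_iff_eq, List.mem_cons]
      constructor
      · rintro (⟨h | h⟩ | ⟨hdm, u, hu, h⟩)
        · exact Or.inr ⟨by rw [h]; exact hc, (t1, t2), Or.inl rfl, h.symm⟩
        · exact Or.inl h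
        · exact Or.inr ⟨hdm, u, Or.inr hu, h⟩
      · rintro (h | ⟨hdm, u, hu | hu, h⟩)
        · exact Or.inl (Or.inr h)
        · exact Or.inl (Or.inl (by rw [← h, hu]))
        · exact Or.inr ⟨hdm, u, hu, h⟩
    · rw [if_neg hc, ih]
      simp only [List.mem_cons]
      constructor
      · rintro (h | ⟨hdm, u, hu, h⟩)
        · exact Or.inl h
        · exact Or.inr ⟨hdm, u, Or.inr hu, h⟩
      · rintro (h | ⟨hdm, u, hu | hu, h⟩)
        · exact Or.inl h
        · exact absurd (show dims.contains t1 = true by rw [show t1 = d by rw [← h, hu]]; exact hdm) hc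
        · exact Or.inr ⟨hdm, u, hu, h⟩

-- membership in b_values[d] after the indexing fold
theorem pvStepB_memV (dims : PySem.Set String) (ontologies : List (String × List (String × List String)))
    (bs : List (String × String)) (V R : PySem.Dict String (PySem.Set String)) (d x : String) :
    x ∈ (bs.foldl (pvStepB dims ontologies) (V, R)).1.getD d PySem.Set.empty ↔
      x ∈ V.getD d PySem.Set.empty ∨ (dims.contains d = true ∧ (d, x) ∈ bs) := by
  induction bs generalizing V R with
  | nil => simp
  | cons t rest ih =>
    obtain ⟨t1, t2⟩ := t
    simp only [List.foldl_cons, pvStepB]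
    by_cases hc : dims.contains t1 = true
    · rw [if_pos hc, ih]
      by_cases hd : d = t1
      · subst hd
        rw [PySem.Dict.getD_insert_self, PySem.Set.mem_add]
        simp only [List.mem_cons, Prod.mk.injEq, hc, true_and]
        tauto
      · rw [PySem.Dict.getD_insert_of_ne _ _ _ hd]
        simp only [List.mem_cons, Prod.mk.injEq]
        have hne : ¬(d = t1 ∧ x = t2) := fun h => hd h.1
        tauto
    · rw [if_neg hc, ih]
      simp only [List.mem_cons, Prod.mk.injEq]
      constructor
      · rintro (h | ⟨hdm, h⟩)
        · exact Or.inl h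
        · exact Or.inr ⟨hdm, Or.inr h⟩
      · rintro (h | ⟨hdm, ⟨rfl, rfl⟩ | h⟩)
        · exact Or.inl h
        · exact absurd hdm hc
        · exact Or.inr ⟨hdm, h⟩

-- membership in b_related[d] after the indexing fold
theorem pvStepB_memR (dims : PySem.Set String) (ontologies : List (String × List (String × List String)))
    (bs : List (String × String)) (V R : PySem.Dict String (PySem.Set String)) (d x : String) :
    x ∈ (bs.foldl (pvStepB dims ontologies) (V, R)).2.getD d PySem.Set.empty ↔
      x ∈ R.getD d PySem.Set.empty ∨ (dims.contains d = true ∧ ∃ u ∈ bs, u.1 = d ∧ x ∈ pvOnt ontologies d u.2) := by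
  induction bs generalizing V R with
  | nil => simp
  | cons t rest ih =>
    obtain ⟨t1, t2⟩ := t
    simp only [List.foldl_cons, pvStepB]
    by_cases hc : dims.contains t1 = true
    · rw [if_pos hc, ih]
      by_cases hd : d = t1
      · subst hd
        rw [PySem.Dict.getD_insert_self, PySem.Set.mem_update]
        simp only [List.mem_cons]
        constructor
        · rintro (⟨h | h⟩ | ⟨hdm, u, hu, h1, h2⟩)
          · exact Or.inl h
          · exact Or.inr ⟨hc, (d, t2), Or.inl rfl, rfl, h⟩
          · exact Or.inr ⟨hdm, u, Or.inr hu, h1, h2⟩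
        · rintro (h | ⟨hdm, u, hu | hu, h1, h2⟩)
          · exact Or.inl (Or.inl h)
          · exact Or.inl (Or.inr (by rw [hu] at h2; exact h2))
          · exact Or.inr ⟨hdm, u, hu, h1, h2⟩
      · rw [PySem.Dict.getD_insert_of_ne _ _ _ hd]
        simp only [List.mem_cons]
        constructor
        · rintro (h | ⟨hdm, u, hu, h1, h2⟩)
          · exact Or.inl h
          · exact Or.inr ⟨hdm, u, Or.inr hu, h1, h2⟩
        · rintro (h | ⟨hdm, u, hu | hu, h1, h2⟩)
          · exact Or.inl h
          · exact absurd (show d = t1 by rw [← h1, hu]) hd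
          · exact Or.inr ⟨hdm, u, hu, h1, h2⟩
    · rw [if_neg hc, ih]
      simp only [List.mem_cons]
      constructor
      · rintro (h | ⟨hdm, u, hu, h1, h2⟩)
        · exact Or.inl h
        · exact Or.inr ⟨hdm, u, Or.inr hu, h1, h2⟩
      · rintro (h | ⟨hdm, u, hu | hu, h1, h2⟩)
        · exact Or.inl h
        · exact absurd (show dims.contains t1 = true by rw [show t1 = d by rw [← h1, hu]]; exact hdm) hc
        · exact Or.inr ⟨hdm, u, hu, h1, h2⟩

-- ===== VERDICT (by name: the statement is the Claim_ definition above) =====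
theorem get_unique_terms_num_spec : Claim_equal_get_unique_terms_num := by
  intro rule_a rule_b ontologies _dom _pre
  unfold Spec_get_unique_terms_num get_unique_terms_num get_unique_terms_num_alt
  apply PySem.List.foldl_congr_mem
  intro acc t ht
  obtain ⟨d, va⟩ := t
  dsimp only
  set dims : PySem.Set String := PySem.Set.ofList (rule_a.map Prod.fst) with hdims
  set st := rule_b.foldl (pvStepB dims ontologies) (PySem.Dict.empty, PySem.Dict.empty) with hst
  have hd : dims.contains d = true := by
    rw [hdims, PySem.Set.contains_iff, PySem.Set.mem_ofList]
    exact List.mem_map.mpr ⟨(d, va), ht, rfl⟩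
  -- A's loop succeeds exactly when no rule_b term of the same dimension equals or relates to va
  have hA : pvInnerA ontologies d va rule_b = true ↔
      ∀ u ∈ rule_b, u.1 = d → (¬va = u.2 ∧ va ∉ pvOnt ontologies d u.2) ∧ u.2 ∉ pvOnt ontologies d va := by
    rw [pvInnerA_eq_not_any, Bool.not_eq_true', List.any_eq_false]
    exact ⟨fun h u hu => by simpa using h u hu, fun h u hu => by simpa using h u hu⟩
  have hdm : d ∈ dims := (PySem.Set.contains_iff _ _).mp hd
  have hV : ∀ x, x ∈ st.1.getD d PySem.Set.empty ↔ (d, x) ∈ rule_b := by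
    intro x; rw [hst, pvStepB_memV]; simp [hdm]
  have hR : ∀ x, x ∈ st.2.getD d PySem.Set.empty ↔
      ∃ u ∈ rule_b, u.1 = d ∧ x ∈ pvOnt ontologies d u.2 := by
    intro x; rw [hst, pvStepB_memR]; simp [hdm]
  by_cases hcont : st.1.contains d = true
  · conv_rhs => rw [if_neg (show ¬st.1.contains d = false by simp [hcont])]
    by_cases hq : ∀ u ∈ rule_b, u.1 = d → (¬va = u.2 ∧ va ∉ pvOnt ontologies d u.2) ∧ u.2 ∉ pvOnt ontologies d va
    · rw [if_pos (hA.mpr hq)]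
      have hv : (st.1.getD d PySem.Set.empty).contains va = false := by
        cases hvv : (st.1.getD d PySem.Set.empty).contains va with
        | false => rfl
        | true =>
          have := (hV va).mp ((PySem.Set.contains_iff _ _).mp hvv)
          exact absurd rfl (hq (d, va) this rfl).1.1
      have hr : (st.2.getD d PySem.Set.empty).contains va = false := by
        cases hvv : (st.2.getD d PySem.Set.empty).contains va with
        | false => rfl
        | true =>
          obtain ⟨u, hu, hud, h⟩ := (hR va).mp ((PySem.Set.contains_iff _ _).mp hvv)
          exact absurd h (hq u hu hud).1.2
      have hdis : PySem.Set.isdisjoint (st.1.getD d PySem.Set.empty) (pvOnt ontologies d va) = true := by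
        rw [pv_isdisjoint_iff]
        intro x hx hmem
        exact absurd hmem (hq (d, x) ((hV x).mp hx) rfl).2
      rw [if_pos ⟨hv, hr, hdis⟩]
    · rw [if_neg (show ¬pvInnerA ontologies d va rule_b = true by rw [hA]; exact hq)]
      rw [if_neg]
      rintro ⟨hv, hr, hdis⟩
      refine hq (fun u hu hud => ⟨⟨?_, ?_⟩, ?_⟩)
      · intro hva
        have hmemb : (d, va) ∈ rule_b := by rw [hva, ← hud]; simpa using hu
        have : (st.1.getD d PySem.Set.empty).contains va = true :=
          (PySem.Set.contains_iff _ _).mpr ((hV va).mpr hmemb)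
        rw [hv] at this; exact Bool.false_ne_true this
      · intro hmem
        have : (st.2.getD d PySem.Set.empty).contains va = true :=
          (PySem.Set.contains_iff _ _).mpr ((hR va).mpr ⟨u, hu, hud, hmem⟩)
        rw [hr] at this; exact Bool.false_ne_true this
      · intro hmem
        have hu2 : u.2 ∈ st.1.getD d PySem.Set.empty :=
          (hV u.2).mpr (by rw [← hud]; simpa using hu)
        exact (pv_isdisjoint_iff _ _).mp hdis u.2 hu2 hmem
  · have h1 : st.1.contains d = false := by
      cases hvv : st.1.contains d with
      | false => rfl
      | true => exact absurd hvv hcont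
    rw [if_pos h1]
    have hnone : ∀ u ∈ rule_b, u.1 ≠ d := by
      intro u hu hud
      exact hcont ((pvStepB_contains dims ontologies rule_b _ _ d).mpr (Or.inr ⟨hd, u, hu, hud⟩))
    rw [if_pos (hA.mpr (fun u hu hud => absurd hud (hnone u hu)))]
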